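-- pv_equiv track=rewrite | github.com/ayoubzulfiqar/Leetcode-Medium | NumberofEqualCountSubstrings/number_of_equal_count_substrings.py | numberOfEqualCountSubstrings
-- ===== SOURCE A (Python) =====
-- def numberOfEqualCountSubstrings(s: str) -> int:
--     n = len(s)
--     total_count = 0
--
--     for i in range(n):
--         char_counts = [0] * 26
--
--         for j in range(i, n):
--             char_counts[ord(s[j]) - ord('a')] += 1
--
--             first_freq = -1
--             is_equal_count = True
--
--             for k in range(26):
--                 current_char_freq = char_counts[k]
--
--                 if current_char_freq > 0:
--                     if first_freq == -1:
--                         first_freq = current_char_freq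
--                     elif current_char_freq != first_freq:
--                         is_equal_count = False
--                         break
--
--             if is_equal_count:
--                 total_count += 1
--
--     return total_count
-- ===== SOURCE B (Python) =====
-- def numberOfEqualCountSubstrings(s: str) -> int:
--     n = len(s)
--     total_count = 0
--     for i in range(n):
--         counts = [0] * 26
--         distinct = 0
--         max_freq = 0
--         for j in range(i, n):
--             idx = ord(s[j]) - ord('a')
--             c = counts[idx] + 1
--             counts[idx] = c
--             if c == 1:
--                 distinct += 1
--             if c > max_freq:
--                 max_freq = c
--             if max_freq * distinct == j - i + 1:
--                 total_count += 1
--     return total_count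
-- ===== Notes on version B (the rewrite author's own statement) =====
-- stated objective: faster
-- what changed: Instead of rescanning all 26 frequency slots after every extension to test equal counts, B maintains the distinct-character count and the maximum frequency incrementally and tests equality by the O(1) identity max_freq * distinct == window length.
import Mathlib
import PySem

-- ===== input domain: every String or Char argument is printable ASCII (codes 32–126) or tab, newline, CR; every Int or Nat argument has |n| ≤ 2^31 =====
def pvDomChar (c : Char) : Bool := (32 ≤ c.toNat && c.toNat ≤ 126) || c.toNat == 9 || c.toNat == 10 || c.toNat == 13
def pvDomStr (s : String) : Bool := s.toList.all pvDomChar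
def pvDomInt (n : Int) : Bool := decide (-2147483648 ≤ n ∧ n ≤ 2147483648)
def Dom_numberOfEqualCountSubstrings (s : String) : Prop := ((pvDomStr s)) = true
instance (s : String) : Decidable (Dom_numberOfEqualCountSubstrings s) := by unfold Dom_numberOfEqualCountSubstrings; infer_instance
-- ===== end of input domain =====

-- B replaces A's 26-slot rescan after every window extension by incrementally
-- maintained distinct-count and max-frequency aggregates with an O(1) equality
-- test (max_freq * distinct == window length): a constant-factor speed-up.

-- ===== PORT A =====
-- A's inner `for k in range(26)` scan over char_counts with first_freq / break,
-- transliterated as structural recursion over the counts list (same values, same order).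
def pvCheckLoop : List Int → Int → Bool
  | [], _ => true
  | c :: rest, ff =>
    if c > 0 then
      if ff == -1 then pvCheckLoop rest c
      else if c != ff then false
      else pvCheckLoop rest ff
    else pvCheckLoop rest ff

-- body of A's `for j in range(i, n)` loop; state = (char_counts, total_count)
def pvStepA (cs : List Char) (st : List Int × Int) (j : Int) : List Int × Int :=
  let counts := st.1
  let ch := (PySem.List.pyGet? cs j).getD ' '  -- s[j]; none = IndexError, outside Pre_
  let idx : Int := (ch.toNat : Int) - 97       -- ord(s[j]) - ord('a')
  let counts' := PySem.List.pySetD counts idx (PySem.List.pyGetD counts idx 0 + 1)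
  if pvCheckLoop counts' (-1) then (counts', st.2 + 1) else (counts', st.2)

def numberOfEqualCountSubstrings (s : String) : Int :=
  let cs := s.toList
  let n : Int := PySem.List.len cs
  (PySem.List.pyRange 0 n 1).foldl
    (fun total_count i =>
      ((PySem.List.pyRange i n 1).foldl (pvStepA cs) (List.replicate 26 0, total_count)).2)
    0

-- ===== PORT B =====
-- body of B's inner loop; state = (counts, distinct, max_freq, total_count)
def pvStepB (cs : List Char) (i : Int) (st : List Int × Int × Int × Int) (j : Int) :
    List Int × Int × Int × Int :=
  let counts := st.1
  let distinct := st.2.1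
  let maxFreq := st.2.2.1
  let tot := st.2.2.2
  let ch := (PySem.List.pyGet? cs j).getD ' '  -- s[j]; none = IndexError, outside Pre_
  let idx : Int := (ch.toNat : Int) - 97       -- ord(s[j]) - ord('a')
  let c := PySem.List.pyGetD counts idx 0 + 1
  let counts' := PySem.List.pySetD counts idx c
  let distinct' := if c == 1 then distinct + 1 else distinct
  let maxFreq' := if c > maxFreq then c else maxFreq
  let tot' := if maxFreq' * distinct' == j - i + 1 then tot + 1 else tot
  (counts', distinct', maxFreq', tot')

def numberOfEqualCountSubstrings_alt (s : String) : Int :=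
  let cs := s.toList
  let n : Int := PySem.List.len cs
  (PySem.List.pyRange 0 n 1).foldl
    (fun total_count i =>
      ((PySem.List.pyRange i n 1).foldl (pvStepB cs i)
        (List.replicate 26 0, 0, 0, total_count)).2.2.2)
    0

-- ===== PRECONDITION & SPEC =====
-- A indexes a 26-element list by ord(c)-97, so it raises IndexError exactly when some
-- character code is outside [71, 122] (Python accepts indices -26..25, negatives wrapping).
-- Pre_ excludes exactly those raising inputs; on every char code in [71, 122] A returns.
def Pre_numberOfEqualCountSubstrings (s : String) : Prop :=
  s.toList.all (fun c => 71 ≤ c.toNat && c.toNat ≤ 122) = true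
instance (s : String) : Decidable (Pre_numberOfEqualCountSubstrings s) := by
  unfold Pre_numberOfEqualCountSubstrings; infer_instance
def pvWitness_numberOfEqualCountSubstrings : String := "abcab"
def Spec_numberOfEqualCountSubstrings (s : String) (out : Int) : Prop := out = numberOfEqualCountSubstrings_alt s
instance (s : String) (out : Int) : Decidable (Spec_numberOfEqualCountSubstrings s out) := by unfold Spec_numberOfEqualCountSubstrings; infer_instance

-- ===== CLAIM (what is proved, stated in full; the proofs are below) =====
def Claim_equal_numberOfEqualCountSubstrings : Prop := ∀ (s : String), Dom_numberOfEqualCountSubstrings s → Pre_numberOfEqualCountSubstrings s → Spec_numberOfEqualCountSubstrings s (numberOfEqualCountSubstrings s)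

-- ===== LEMMAS AND PROOFS =====

-- number of positive slots (B's `distinct`) and maximum slot value (B's `max_freq`)
def pvD (l : List Int) : Int := (l.countP (fun x => decide (0 < x)) : Int)
def pvM (l : List Int) : Int := l.foldl max 0

lemma pv_pyGetD_norm (l : List Int) (idx : Int) (p : Nat) (h1 : -(l.length : Int) ≤ idx)
    (h2 : idx < l.length) (hpe : p = if 0 ≤ idx then idx.toNat else l.length - (-idx).toNat)
    (hp : p < l.length) :
    PySem.List.pyGetD l idx 0 = l[p] := by
  subst hpe
  by_cases h : 0 ≤ idx
  · simp only [h, if_true] at hp ⊢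
    exact PySem.List.pyGetD_eq_getElem l 0 h h2
  · simp only [h, if_false] at hp ⊢
    have hk1 : 0 < (-idx).toNat := by omega
    have hk2 : (-idx).toNat ≤ l.length := by omega
    have hthis := PySem.List.pyGetD_neg_natCast l (-idx).toNat 0 hk1 hk2
    have he : (-(((-idx).toNat : Nat) : Int)) = idx := by omega
    rw [he] at hthis
    exact hthis

lemma pv_pySetD_norm (l : List Int) (idx : Int) (v : Int) (p : Nat)
    (h1 : -(l.length : Int) ≤ idx) (_h2 : idx < l.length)
    (hpe : p = if 0 ≤ idx then idx.toNat else l.length - (-idx).toNat) :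
    PySem.List.pySetD l idx v = l.set p v := by
  subst hpe
  by_cases h : 0 ≤ idx
  · simp [h, PySem.List.pySetD_of_nonneg l v h]
  · have h0 : ¬ (0 ≤ idx) := h
    simp only [h0, if_false]
    simp [PySem.List.pySetD, PySem.List.pySet?, PySem.List.pyIdx?, h0, h1]

lemma pv_sum_set (l : List Int) (p : Nat) (hp : p < l.length) (v : Int) :
    (l.set p v).sum = l.sum - l[p] + v := by
  rw [List.sum_set]
  have hdrop : l.drop p = l[p] :: l.drop (p+1) := List.drop_eq_getElem_cons hp
  have hsum : l.sum = (l.take p).sum + (l.drop p).sum := (List.sum_take_add_sum_drop l p).symm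
  rw [hdrop] at hsum
  simp only [List.sum_cons] at hsum
  simp only [hp, if_true]
  omega

lemma pv_countP_set (l : List Int) (p : Nat) (hp : p < l.length) (v : Int) :
    ((l.set p v).countP (fun x => decide (0 < x)) : Int) + (if 0 < l[p] then 1 else 0)
      = (l.countP (fun x => decide (0 < x)) : Int) + (if 0 < v then 1 else 0) := by
  induction l generalizing p with
  | nil => simp at hp
  | cons hd tl ih =>
    cases p with
    | zero => simp [List.countP_cons]; split_ifs <;> omega
    | succ q =>
      simp only [List.set_cons_succ, List.countP_cons, List.getElem_cons_succ]
      have := ih q (by simpa using hp)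
      split_ifs <;> push_cast at this ⊢ <;> omega

lemma pv_foldl_max_max (l : List Int) (a b : Int) :
    l.foldl max (max a b) = max (l.foldl max a) b := by
  induction l generalizing a with
  | nil => rfl
  | cons c tl ih =>
    simp only [List.foldl_cons]
    rw [max_right_comm a b c, ih]

lemma pv_pvM_set (l : List Int) (p : Nat) (hp : p < l.length) (v : Int) (hv : l[p] ≤ v) :
    pvM (l.set p v) = max (pvM l) v := by
  simp only [pvM]
  suffices h : ∀ init : Int, (l.set p v).foldl max init = max (l.foldl max init) v by exact h 0
  induction l generalizing p with
  | nil => simp at hp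
  | cons hd tl ih =>
    intro init
    cases p with
    | zero =>
      simp only [List.set_cons_zero, List.foldl_cons]
      rw [pv_foldl_max_max tl init v, pv_foldl_max_max tl init hd]
      simp only [List.getElem_cons_zero] at hv
      omega
    | succ q =>
      simp only [List.set_cons_succ, List.foldl_cons]
      exact ih q (by simpa using hp) (by simpa using hv) (max init hd)

lemma pv_check_pos (l : List Int) (f : Int) (hf : 0 < f) :
    (pvCheckLoop l f = true) ↔ ∀ x ∈ l, 0 < x → x = f := by
  induction l with
  | nil => simp [pvCheckLoop]
  | cons c rest ih =>
    have hne : (f == -1) = false := by simp; omega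
    simp only [pvCheckLoop, hne, Bool.false_eq_true, if_false]
    by_cases hc : c > 0
    · simp only [hc, if_true]
      by_cases he : c = f
      · have hb : (c != f) = false := by simp [he]
        simp only [hb, Bool.false_eq_true, if_false]
        rw [ih]
        constructor
        · intro h x hx hpx
          rcases List.mem_cons.mp hx with rfl | hx'
          · exact he
          · exact h x hx' hpx
        · intro h x hx hpx
          exact h x (List.mem_cons_of_mem c hx) hpx
      · have hb : (c != f) = true := by simp [he]
        simp only [hb, if_true]
        simp only [Bool.false_eq_true, false_iff]
        intro h
        exact he (h c List.mem_cons_self hc)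
    · simp only [hc, if_false]
      rw [ih]
      constructor
      · intro h x hx hpx
        rcases List.mem_cons.mp hx with rfl | hx'
        · omega
        · exact h x hx' hpx
      · intro h x hx hpx
        exact h x (List.mem_cons_of_mem c hx) hpx

lemma pv_check_start (l : List Int) :
    (pvCheckLoop l (-1) = true) ↔ ∀ x ∈ l, ∀ y ∈ l, 0 < x → 0 < y → x = y := by
  induction l with
  | nil => simp [pvCheckLoop]
  | cons c rest ih =>
    by_cases hc : c > 0
    · simp only [pvCheckLoop, hc, if_true]
      simp only [show ((-1 : Int) == -1) = true from rfl, if_true]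
      rw [pv_check_pos rest c hc]
      constructor
      · intro h x hx y hy hpx hpy
        rcases List.mem_cons.mp hx with rfl | hx' <;> rcases List.mem_cons.mp hy with rfl | hy'
        · rfl
        · exact (h y hy' hpy).symm
        · exact h x hx' hpx
        · rw [h x hx' hpx, h y hy' hpy]
      · intro h x hx hpx
        exact h x (List.mem_cons_of_mem c hx) (c) (List.mem_cons_self) hpx hc
    · simp only [pvCheckLoop, hc, if_false]
      rw [ih]
      constructor
      · intro h x hx y hy hpx hpy
        rcases List.mem_cons.mp hx with rfl | hx'
        · omega
        rcases List.mem_cons.mp hy with rfl | hy'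
        · omega
        exact h x hx' y hy' hpx hpy
      · intro h x hx y hy hpx hpy
        exact h x (List.mem_cons_of_mem c hx) y (List.mem_cons_of_mem c hy) hpx hpy

lemma pv_pvM_mem (l : List Int) : pvM l = 0 ∨ pvM l ∈ l := by
  suffices h : ∀ init : Int, l.foldl max init = init ∨ l.foldl max init ∈ l by
    exact h 0
  induction l with
  | nil => intro init; left; rfl
  | cons c rest ih =>
    intro init
    simp only [List.foldl_cons]
    rcases ih (max init c) with h | h
    · rcases le_total init c with hle | hle
      · right; rw [h]; simp [max_eq_right hle]
      · left; rw [h]; simp [max_eq_left hle]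
    · right; exact List.mem_cons_of_mem c h

lemma pv_sum_le (l : List Int) (m : Int) (h : ∀ x ∈ l, 0 ≤ x ∧ x ≤ m) :
    l.sum ≤ m * pvD l := by
  induction l with
  | nil => simp [pvD]
  | cons c rest ih =>
    have hc := h c (by simp)
    have ih' := ih (fun x hx => h x (List.mem_cons_of_mem c hx))
    simp only [List.sum_cons, pvD, List.countP_cons] at ih' ⊢
    by_cases hp : 0 < c
    · simp only [hp, decide_true]
      push_cast
      nlinarith [hc.2]
    · simp only [hp, decide_false]
      push_cast
      have hc0 : c = 0 := by omega
      subst hc0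
      simpa using ih'

lemma pv_eq_iff_all_max (l : List Int) (m : Int) (hm : 0 ≤ m) (h : ∀ x ∈ l, 0 ≤ x ∧ x ≤ m) :
    m * pvD l = l.sum ↔ ∀ x ∈ l, 0 < x → x = m := by
  induction l with
  | nil => simp [pvD]
  | cons c rest ih =>
    have hc := h c (by simp)
    have hrest := fun x hx => h x (List.mem_cons_of_mem c hx)
    have ih' := ih hrest
    have hle := pv_sum_le rest m hrest
    simp only [pvD] at hle
    simp only [List.sum_cons, pvD, List.countP_cons] at ih' ⊢
    by_cases hp : 0 < c
    · simp only [hp, decide_true]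
      constructor
      · intro heq
        have heq2 : m * (rest.countP (fun x => decide (0 < x)) : Int) + m = c + rest.sum := by
          norm_num at heq
          linarith [heq]
        have h1 : m * (rest.countP (fun x => decide (0 < x)) : Int) = rest.sum ∧ c = m := by
          constructor <;> linarith [hc.2, hle, heq2]
        intro x hx hpx
        rcases List.mem_cons.mp hx with rfl | hx'
        · exact h1.2
        · exact (ih'.mp h1.1) x hx' hpx
      · intro hall
        have hcm : c = m := hall c (by simp) hp
        have : m * (rest.countP (fun x => decide (0 < x)) : Int) = rest.sum :=
          ih'.mpr (fun x hx hpx => hall x (List.mem_cons_of_mem c hx) hpx)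
        subst hcm
        push_cast
        linarith [this]
    · have hc0 : c = 0 := by omega
      simp only [hp, decide_false]
      subst hc0
      constructor
      · intro heq x hx hpx
        rcases List.mem_cons.mp hx with rfl | hx'
        · omega
        · refine (ih'.mp ?_) x hx' hpx
          push_cast at heq ⊢
          linarith [heq]
      · intro hall
        have := ih'.mpr (fun x hx hpx => hall x (List.mem_cons_of_mem 0 hx) hpx)
        push_cast
        linarith [this]

lemma pv_check_iff (l : List Int) (h0 : ∀ x ∈ l, 0 ≤ x) (hpos : 0 < l.sum) :
    (pvCheckLoop l (-1) = true) ↔ pvM l * pvD l = l.sum := by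
  have hmax := PySem.List.le_foldl_max l 0
  have hub : ∀ x ∈ l, x ≤ pvM l := fun x hx => hmax.2 x hx
  have hm0 : 0 ≤ pvM l := hmax.1
  have hx0 : ∃ x ∈ l, 0 < x := by
    by_contra hcon
    have hle : ∀ x ∈ l, x ≤ 0 := by
      intro x hx
      by_contra hxx
      exact hcon ⟨x, hx, by omega⟩
    have : l.sum ≤ 0 := by
      have : ∀ x ∈ l, x = 0 := fun x hx => le_antisymm (hle x hx) (h0 x hx)
      rw [List.sum_eq_zero this]
    omega
  obtain ⟨x0, hx0m, hx0p⟩ := hx0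
  have hMpos : 0 < pvM l := lt_of_lt_of_le hx0p (hub x0 hx0m)
  have hMmem : pvM l ∈ l := by
    rcases pv_pvM_mem l with h | h
    · omega
    · exact h
  rw [pv_check_start, pv_eq_iff_all_max l (pvM l) hm0 (fun x hx => ⟨h0 x hx, hub x hx⟩)]
  constructor
  · intro h x hx hpx
    exact h x hx (pvM l) hMmem hpx hMpos
  · intro h x hx y hy hpx hpy
    rw [h x hx hpx, h y hy hpy]

-- inner-loop equivalence, by induction on the remaining range
lemma pv_inner (cs : List Char) (hv : ∀ c ∈ cs, 71 ≤ c.toNat ∧ c.toNat ≤ 122)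
    (i : Int) (hi : 0 ≤ i) :
    ∀ (k : Nat) (j : Int), i ≤ j → j ≤ (cs.length : Int) → ((cs.length : Int) - j).toNat = k →
    ∀ (counts : List Int) (t : Int),
      counts.length = 26 → (∀ x ∈ counts, 0 ≤ x) → counts.sum = j - i →
      ((PySem.List.pyRange j (cs.length : Int) 1).foldl (pvStepA cs) (counts, t)).2
        = ((PySem.List.pyRange j (cs.length : Int) 1).foldl (pvStepB cs i)
            (counts, pvD counts, pvM counts, t)).2.2.2 := by
  intro k
  induction k with
  | zero =>
    intro j hij hjn hk counts t hlen hnn hsum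
    have hle : (cs.length : Int) ≤ j := by omega
    rw [PySem.List.pyRange_one_eq_nil hle]
    rfl
  | succ k ih =>
    intro j hij hjn hk counts t hlen hnn hsum
    have hjlt : j < (cs.length : Int) := by omega
    have hj0 : 0 ≤ j := by omega
    rw [PySem.List.pyRange_one_cons hjlt]
    simp only [List.foldl_cons]
    -- the character read at position j and its (possibly negative) slot index
    have hget : PySem.List.pyGet? cs j = some cs[j.toNat] :=
      PySem.List.pyGet?_eq_some_getElem cs hj0 hjlt
    have hch := hv cs[j.toNat] (List.getElem_mem (by omega))
    set ch := cs[j.toNat] with hch_def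
    set idx : Int := ((ch.toNat : Int) - 97) with hidx_def
    have hidx1 : -(counts.length : Int) ≤ idx := by simp [hidx_def, hlen]; omega
    have hidx2 : idx < (counts.length : Int) := by simp [hidx_def, hlen]; omega
    set p : Nat := if 0 ≤ idx then idx.toNat else counts.length - (-idx).toNat with hp_def
    have hp : p < counts.length := by
      rw [hp_def]; split_ifs <;> omega
    have hgetD := pv_pyGetD_norm counts idx p hidx1 hidx2 hp_def hp
    have hsetD := pv_pySetD_norm counts idx (counts[p] + 1) p hidx1 hidx2 hp_def
    have hold0 : 0 ≤ counts[p] := hnn counts[p] (List.getElem_mem hp)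
    set counts' := counts.set p (counts[p] + 1) with hcounts'
    -- the one step of each loop body
    have hstepA : pvStepA cs (counts, t) j
        = (counts', if pvCheckLoop counts' (-1) then t + 1 else t) := by
      simp only [pvStepA, hget, Option.getD_some, ← hidx_def, hgetD, hsetD, hcounts']
      split_ifs <;> rfl
    have hstepB : pvStepB cs i (counts, pvD counts, pvM counts, t) j
        = (counts',
           (if (counts[p] + 1 == 1) then pvD counts + 1 else pvD counts),
           (if (counts[p] + 1 > pvM counts) then counts[p] + 1 else pvM counts),
           (if ((if (counts[p] + 1 > pvM counts) then counts[p] + 1 else pvM counts)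
                  * (if (counts[p] + 1 == 1) then pvD counts + 1 else pvD counts)
                == j - i + 1) then t + 1 else t)) := by
      simp only [pvStepB, hget, Option.getD_some, ← hidx_def, hgetD, hsetD, hcounts']
    rw [hstepA, hstepB]
    -- the aggregates B maintains are exactly pvD / pvM of the updated counts
    have hd' : (if (counts[p] + 1 == 1) then pvD counts + 1 else pvD counts) = pvD counts' := by
      have hcp := pv_countP_set counts p hp (counts[p] + 1)
      have h1 : (0 < counts[p] + 1) := by omega
      simp only [h1, if_true] at hcp
      by_cases hz : counts[p] = 0
      · have hb : (counts[p] + 1 == 1) = true := by simp [hz]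
        simp only [hb, if_true, pvD, hcounts']
        have hif : ¬ (0 < counts[p]) := by omega
        simp only [hif, if_false] at hcp
        omega
      · have hb : (counts[p] + 1 == 1) = false := by simp; omega
        simp only [hb, Bool.false_eq_true, if_false, pvD, hcounts']
        have h2 : (0 < counts[p]) := by omega
        simp only [h2, if_true] at hcp
        omega
    have hm' : (if (counts[p] + 1 > pvM counts) then counts[p] + 1 else pvM counts) = pvM counts' := by
      rw [hcounts', pv_pvM_set counts p hp (counts[p] + 1) (by omega)]
      split_ifs <;> omega
    have hsum' : counts'.sum = j + 1 - i := by
      rw [hcounts', pv_sum_set counts p hp (counts[p] + 1)]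
      omega
    have hnn' : ∀ x ∈ counts', 0 ≤ x := by
      intro x hx
      rcases List.mem_or_eq_of_mem_set hx with h | h
      · exact hnn x h
      · omega
    -- the two loop guards decide the same proposition
    have hcond : pvCheckLoop counts' (-1)
        = ((if (counts[p] + 1 > pvM counts) then counts[p] + 1 else pvM counts)
             * (if (counts[p] + 1 == 1) then pvD counts + 1 else pvD counts) == j - i + 1) := by
      rw [hd', hm']
      rw [Bool.eq_iff_iff]
      rw [pv_check_iff counts' hnn' (by omega)]
      rw [beq_iff_eq, hsum']
      constructor <;> intro h <;> omega
    rw [hcond, hd', hm']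
    exact ih (j + 1) (by omega) (by omega) (by omega) counts'
      (if (pvM counts' * pvD counts' == j - i + 1) then t + 1 else t)
      (by rw [hcounts']; simpa using hlen) hnn' (by omega)

-- ===== VERDICT (by name: the statement is the Claim_ definition above) =====
set_option maxRecDepth 8192 in
theorem numberOfEqualCountSubstrings_spec : Claim_equal_numberOfEqualCountSubstrings := by
  intro s _hdom hpre
  have hv : ∀ c ∈ s.toList, 71 ≤ c.toNat ∧ c.toNat ≤ 122 := by
    simpa [Pre_numberOfEqualCountSubstrings, List.all_eq_true, decide_eq_true_iff] using hpre
  unfold Spec_numberOfEqualCountSubstrings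
  unfold numberOfEqualCountSubstrings numberOfEqualCountSubstrings_alt
  simp only [PySem.List.len_eq]
  apply PySem.List.foldl_congr_mem
  intro acc x hx
  have hmem := (PySem.List.mem_pyRange_one).mp hx
  have h1 : pvD (List.replicate 26 (0 : Int)) = 0 := by decide
  have h2 : pvM (List.replicate 26 (0 : Int)) = 0 := by decide
  have h := pv_inner s.toList hv x hmem.1 ((s.toList.length : Int) - x).toNat x
    (le_refl x) (by omega) rfl (List.replicate 26 0) acc
    (by simp)
    (by intro y hy; rw [List.eq_of_mem_replicate hy])
    (by simp)
  rw [h1, h2] at h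
  exact h
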